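-- pv_equiv track=rewrite | github.com/qcsm/yearofthetiger | solution.py | solution
-- ===== SOURCE A (Python) =====
-- def solution(T):
--   counter = dict()
--   for c in T:
--     cs1 = c[1]+c[0]+c[2]
--     cs2 = c[0]+c[2]+c[1]
--     #all.append([c,cs1,cs2])
--     done = dict()
--
--     for x in (c, cs1, cs2):
--       if x not in done.keys():
--         if x in counter.keys():
--           counter[x] += 1
--         else:
--           counter[x] = 1
--       done[x] = 1
--
--   return sorted(counter.items(), key=lambda kv: kv[1]).pop()[1]
-- ===== SOURCE B (Python) =====
-- def solution(T):
--   variants = []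
--   for c in T:
--     variants.extend({c, c[1]+c[0]+c[2], c[0]+c[2]+c[1]})
--   variants.sort()
--   runs = []
--   run = 0
--   prev = None
--   for x in variants:
--     if run and x != prev:
--       runs.append(run)
--       run = 0
--     run += 1
--     prev = x
--   if run:
--     runs.append(run)
--   return sorted(runs).pop()
-- ===== Notes on version B (the rewrite author's own statement) =====
-- stated objective: alternative
-- what changed: A tallies the deduplicated rotation variants in an incrementally maintained counter dict and pops the last of its value-sorted items; B instead flattens the per-element variant sets into one list, sorts it, scans it once collecting run lengths of equal consecutive strings, and pops the largest run length, with no dict at all.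
import Mathlib
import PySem

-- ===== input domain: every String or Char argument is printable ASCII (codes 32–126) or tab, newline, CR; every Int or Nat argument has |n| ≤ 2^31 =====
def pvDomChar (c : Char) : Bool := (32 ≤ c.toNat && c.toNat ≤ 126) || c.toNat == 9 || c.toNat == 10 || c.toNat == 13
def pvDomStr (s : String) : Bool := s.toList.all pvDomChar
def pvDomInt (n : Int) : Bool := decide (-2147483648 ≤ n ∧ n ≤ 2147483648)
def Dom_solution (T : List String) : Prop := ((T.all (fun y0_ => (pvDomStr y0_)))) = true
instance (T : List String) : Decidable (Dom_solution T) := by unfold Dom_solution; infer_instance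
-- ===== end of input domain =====

-- B replaces A's incrementally maintained counter dict by sorting the flat list of
-- per-element variant sets and scanning its runs of equal strings; alternative algorithm
-- of similar cost, no dict. (B sorts only its own local list; no argument is mutated.)

-- ===== PORT A =====
-- c[1]+c[0]+c[2] (the "" arm is the IndexError case, unreachable under Pre_solution)
def pvVar1 (c : String) : String :=
  match PySem.Str.pyGet? c 1, PySem.Str.pyGet? c 0, PySem.Str.pyGet? c 2 with
  | some x, some y, some z => String.ofList [x, y, z]
  | _, _, _ => ""

-- c[0]+c[2]+c[1] (the "" arm is the IndexError case, unreachable under Pre_solution)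
def pvVar2 (c : String) : String :=
  match PySem.Str.pyGet? c 0, PySem.Str.pyGet? c 2, PySem.Str.pyGet? c 1 with
  | some x, some y, some z => String.ofList [x, y, z]
  | _, _, _ => ""

def solution (T : List String) : Int :=
  let counter : PySem.Dict String Int :=
    T.foldl (fun counter c =>
      let cs1 := pvVar1 c
      let cs2 := pvVar2 c
      let st := [c, cs1, cs2].foldl
        (fun (st : PySem.Dict String Int × PySem.Dict String Int) x =>
          let counter := st.1
          let done := st.2
          let counter :=
            if ¬ (done.keys.contains x) then
              if counter.keys.contains x then counter.insert x (counter.getD x 0 + 1)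
              else counter.insert x 1
            else counter
          (counter, done.insert x 1))
        (counter, PySem.Dict.empty)
      st.1) PySem.Dict.empty
  match PySem.List.pop? (PySem.List.sorted counter.items (fun kv => kv.2) false) with
  | some (kv, _) => kv.2
  | none => 0   -- IndexError from .pop() on an empty list: excluded by Pre_solution

-- ===== PORT B =====
def solution_alt (T : List String) : Int :=
  let variants : List String :=
    T.foldl (fun acc c => acc ++ PySem.Set.ofList [c, pvVar1 c, pvVar2 c]) []
  let variants := PySem.List.sorted variants (fun y => y) false
  -- `for x in variants:` maintaining (runs, run, prev); `run += 1` is performed in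
  -- both branches of the `if run and x != prev` close-the-run test
  let st := variants.foldl
    (fun (st : List Int × Int × Option String) x =>
      if st.2.1 ≠ 0 ∧ some x ≠ st.2.2 then (st.1 ++ [st.2.1], (0 : Int) + 1, some x)
      else (st.1, st.2.1 + 1, some x))
    ([], 0, none)
  let runs := if st.2.1 ≠ 0 then st.1 ++ [st.2.1] else st.1
  match PySem.List.pop? (PySem.List.sorted runs (fun y => y) false) with
  | some (m, _) => m
  | none => 0   -- IndexError from .pop() on an empty list: excluded by Pre_solution

-- ===== PRECONDITION & SPEC =====
-- A raises IndexError on an empty T (.pop() of an empty list) and on any element of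
-- fewer than 3 characters (c[1]/c[2]); Pre_ excludes exactly those inputs.
def Pre_solution (T : List String) : Prop := T ≠ [] ∧ ∀ c ∈ T, 3 ≤ c.toList.length
instance (T : List String) : Decidable (Pre_solution T) := by unfold Pre_solution; infer_instance

def pvWitness_solution : List String := ["abc", "bac", "xyz"]

def Spec_solution (T : List String) (out : Int) : Prop := out = solution_alt T
instance (T : List String) (out : Int) : Decidable (Spec_solution T out) := by unfold Spec_solution; infer_instance

-- ===== CLAIM (what is proved, stated in full; the proofs are below) =====
def Claim_equal_solution : Prop := ∀ (T : List String), Dom_solution T → Pre_solution T → Spec_solution T (solution T)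

-- ===== LEMMAS AND PROOFS =====

-- the flat list of per-element deduplicated variant strings (B's unsorted `variants`)
def pvFlat (T : List String) : List String :=
  T.flatMap (fun c => PySem.Set.ofList [c, pvVar1 c, pvVar2 c])

-- the plain counting step (both branches of A's counter update collapse to it)
def pvUpd (d : PySem.Dict String Int) (x : String) : PySem.Dict String Int :=
  d.insert x (d.getD x 0 + 1)

lemma pvKeysContains (d : PySem.Dict String Int) (x : String) :
    d.keys.contains x = d.contains x := by
  rw [PySem.Dict.contains, PySem.Dict.keys]
  rw [List.contains_eq_any_beq, List.any_map]
  simp [Function.comp_def, BEq.comm]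

lemma pvUpd_eq' (d : PySem.Dict String Int) (x : String) :
    (if d.contains x = true then d.insert x (d.getD x 0 + 1) else d.insert x 1) = pvUpd d x := by
  by_cases h : d.contains x = true
  · rw [if_pos h]; rfl
  · rw [if_neg h, pvUpd, PySem.Dict.getD_of_not_contains d 0 (by simpa using h)]
    norm_num

-- A's inner loop over the tuple (c, cs1, cs2) with its `done` dict counts each
-- distinct variant exactly once
lemma pvInner_eq (d : PySem.Dict String Int) (a b e : String) :
    (([a, b, e].foldl
        (fun (st : PySem.Dict String Int × PySem.Dict String Int) x =>
          let counter := st.1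
          let done := st.2
          let counter :=
            if ¬ (done.keys.contains x) then
              if counter.keys.contains x then counter.insert x (counter.getD x 0 + 1)
              else counter.insert x 1
            else counter
          (counter, done.insert x 1))
        (d, PySem.Dict.empty)).1)
      = (PySem.Set.ofList [a, b, e]).foldl pvUpd d := by
  simp only [List.foldl, pvKeysContains]
  by_cases hba : b = a <;> by_cases hea : e = a <;> by_cases heb : e = b <;>
    simp_all [PySem.Dict.contains_insert, PySem.Dict.contains_empty, pvUpd_eq',
              PySem.Set.ofList, PySem.Set.add, List.foldl]

-- A's whole loop builds Counter(pvFlat T)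
lemma pvCounter_eq (T : List String) :
    (T.foldl (fun counter c =>
      let cs1 := pvVar1 c
      let cs2 := pvVar2 c
      let st := [c, cs1, cs2].foldl
        (fun (st : PySem.Dict String Int × PySem.Dict String Int) x =>
          let counter := st.1
          let done := st.2
          let counter :=
            if ¬ (done.keys.contains x) then
              if counter.keys.contains x then counter.insert x (counter.getD x 0 + 1)
              else counter.insert x 1
            else counter
          (counter, done.insert x 1))
        (counter, PySem.Dict.empty)
      st.1) PySem.Dict.empty)
      = PySem.Dict.counter (pvFlat T) := by
  have h1 : ∀ (init : PySem.Dict String Int),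
      (T.foldl (fun counter c =>
        ([c, pvVar1 c, pvVar2 c].foldl
          (fun (st : PySem.Dict String Int × PySem.Dict String Int) x =>
            let counter := st.1
            let done := st.2
            let counter :=
              if ¬ (done.keys.contains x) then
                if counter.keys.contains x then counter.insert x (counter.getD x 0 + 1)
                else counter.insert x 1
              else counter
            (counter, done.insert x 1))
          (counter, PySem.Dict.empty)).1) init)
        = (pvFlat T).foldl pvUpd init := by
    intro init
    rw [pvFlat, List.flatMap_def, List.foldl_flatten, List.foldl_map]
    apply PySem.List.foldl_congr_mem
    intro acc c _
    exact pvInner_eq acc c (pvVar1 c) (pvVar2 c)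
  rw [h1 PySem.Dict.empty]
  exact PySem.Dict.foldl_insert_getD_add_one_eq_counter (pvFlat T)

lemma pvPop_getLast {α : Type} (l : List α) (h : l ≠ []) :
    PySem.List.pop? l = some (l.getLast h, l.dropLast) := by
  have hl : 1 ≤ l.length := List.length_pos_iff.mpr h
  simp [PySem.List.pop?, PySem.List.pyIdx?, hl,
        List.getElem?_eq_getElem (by omega : l.length - 1 < l.length),
        List.getLast_eq_getElem]

-- the popped (last) element of a stably sorted list is a member of key-maximal key
lemma pvSorted_last_max {α κ : Type} [LinearOrder κ] (l : List α) (key : α → κ) (h : l ≠ []) :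
    ∃ (hs : PySem.List.sorted l key false ≠ []),
      ((PySem.List.sorted l key false).getLast hs) ∈ l ∧
      ∀ y ∈ l, key y ≤ key ((PySem.List.sorted l key false).getLast hs) := by
  have hs : PySem.List.sorted l key false ≠ [] := by
    simpa [PySem.List.sorted_eq_nil_iff]
  refine ⟨hs, (PySem.List.mem_sorted l key false _).mp (List.getLast_mem hs), ?_⟩
  intro y hy
  have hy' : y ∈ PySem.List.sorted l key false := (PySem.List.mem_sorted l key false y).mpr hy
  have hp := PySem.List.sorted_pairwise l key
  rw [List.pairwise_iff_getElem] at hp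
  obtain ⟨i, hi, rfl⟩ := List.mem_iff_getElem.mp hy'
  rw [List.getLast_eq_getElem]
  rcases Nat.lt_or_ge i ((PySem.List.sorted l key false).length - 1) with hlt | hge
  · exact hp i _ hi (by omega) hlt
  · have : i = (PySem.List.sorted l key false).length - 1 := by omega
    simp [this]

-- prepending a fresh element commutes with the Set.add fold
lemma pvAddFresh (p : String) (l : List String) (hp : ∀ x ∈ l, x ≠ p) :
    ∀ (s : List String), List.foldl PySem.Set.add (p :: s) l = p :: List.foldl PySem.Set.add s l := by
  induction l with
  | nil => intro s; rfl
  | cons x t ih =>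
    intro s
    have hxp : x ≠ p := hp x (by simp)
    have hstep : PySem.Set.add (p :: s) x = p :: PySem.Set.add s x := by
      have hc : (p :: s).contains x = s.contains x := by simp [hxp]
      simp only [PySem.Set.add, PySem.Set.contains, hc]
      split <;> simp
    rw [List.foldl_cons, hstep, List.foldl_cons]
    exact ih (fun y hy => hp y (by simp [hy])) _

lemma pvDedupConsFresh (p : String) (l : List String) (hp : p ∉ l) :
    PySem.List.dedup (p :: l) = p :: PySem.List.dedup l := by
  have h := pvAddFresh p l (fun x hx h => hp (h ▸ hx)) []
  simpa [PySem.List.dedup, PySem.Set.ofList, PySem.Set.add, PySem.Set.contains] using h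

lemma pvDedupConsCons (p : String) (t : List String) :
    PySem.List.dedup (p :: p :: t) = PySem.List.dedup (p :: t) := by
  simp [PySem.List.dedup, PySem.Set.ofList, List.foldl_cons, PySem.Set.add, PySem.Set.contains]

-- B's scan over a sorted tail: an open run of r+1 copies of p, already-closed runs rs
lemma pvScan (l : List String) : ∀ (p : String) (r : Nat) (rs : List Int),
    l.Pairwise (· ≤ ·) → (∀ y ∈ l, p ≤ y) →
    (let st := l.foldl
        (fun (st : List Int × Int × Option String) x =>
          if st.2.1 ≠ 0 ∧ some x ≠ st.2.2 then (st.1 ++ [st.2.1], (0 : Int) + 1, some x)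
          else (st.1, st.2.1 + 1, some x))
        (rs, ((r : Int) + 1), some p)
     if st.2.1 ≠ 0 then st.1 ++ [st.2.1] else st.1)
      = rs ++ (PySem.List.dedup (p :: l)).map
          (fun k => (if k = p then (r : Int) + 1 else 0) + (l.count k : Int)) := by
  induction l with
  | nil =>
    intro p r rs _ _
    simp [PySem.List.dedup, PySem.Set.ofList, PySem.Set.add, PySem.Set.contains]
    omega
  | cons x t ih =>
    intro p r rs hpw hple
    have hpwt : t.Pairwise (· ≤ ·) := hpw.of_cons
    rw [List.foldl_cons]
    by_cases hxp : x = p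
    · subst hxp
      have hcond : ¬((((rs, ((r : Int) + 1), some x) : List Int × Int × Option String).2.1 ≠ 0
          ∧ some x ≠ ((rs, ((r : Int) + 1), some x) : List Int × Int × Option String).2.2)) := by
        simp
      rw [if_neg hcond]
      have hcast : ((r : Int) + 1) + 1 = (((r + 1 : Nat) : Int) + 1) := by push_cast; ring
      simp only [hcast]
      rw [ih x (r + 1) rs hpwt (fun y hy => List.rel_of_pairwise_cons hpw hy)]
      rw [pvDedupConsCons]
      congr 1
      apply List.map_congr_left
      intro k hk
      by_cases hkx : k = x
      · simp [hkx]; ring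
      · simp [hkx, List.count_cons]
        exact fun h => hkx (Eq.symm h)
    · have hpx : p < x := lt_of_le_of_ne (hple x (by simp)) (fun h => hxp h.symm)
      have hcond : ((((rs, ((r : Int) + 1), some p) : List Int × Int × Option String).2.1 ≠ 0
          ∧ some x ≠ ((rs, ((r : Int) + 1), some p) : List Int × Int × Option String).2.2)) := by
        refine ⟨by simp; omega, by simp [hxp]⟩
      rw [if_pos hcond]
      have hIH := ih x 0 (rs ++ [(r : Int) + 1]) hpwt (fun y hy => List.rel_of_pairwise_cons hpw hy)
      simp only [Nat.cast_zero] at hIH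
      rw [hIH]
      have hpnot : p ∉ x :: t := by
        intro hmem
        rcases List.mem_cons.mp hmem with h | hmem
        · exact hxp h.symm
        · exact absurd hpx (not_lt.mpr (List.rel_of_pairwise_cons hpw hmem))
      rw [pvDedupConsFresh p (x :: t) hpnot]
      rw [List.map_cons, List.append_assoc]
      congr 1
      have hcp : (x :: t).count p = 0 := List.count_eq_zero.mpr hpnot
      rw [List.singleton_append]
      congr 1
      · simp [hcp]
      · apply List.map_congr_left
        intro k hk
        have hkmem : k ∈ x :: t := (PySem.List.mem_dedup (x :: t) k).mp hk
        have hkp : k ≠ p := fun h => hpnot (h ▸ hkmem)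
        by_cases hkx : k = x
        · subst hkx
          simp
          rw [if_neg hkp]
          ring
        · simp [hkx, hkp, List.count_cons]
          exact fun h => hkx (Eq.symm h)

-- B's whole scan over the sorted flat list yields the run lengths = per-key counts
lemma pvRuns (F : List String) (h : F ≠ []) :
    (let st := (PySem.List.sorted F (fun y => y) false).foldl
        (fun (st : List Int × Int × Option String) x =>
          if st.2.1 ≠ 0 ∧ some x ≠ st.2.2 then (st.1 ++ [st.2.1], (0 : Int) + 1, some x)
          else (st.1, st.2.1 + 1, some x))
        ([], 0, none)
     if st.2.1 ≠ 0 then st.1 ++ [st.2.1] else st.1)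
      = (PySem.List.dedup (PySem.List.sorted F (fun y => y) false)).map
          (fun k => ((PySem.List.sorted F (fun y => y) false).count k : Int)) := by
  have hs : PySem.List.sorted F (fun y => y) false ≠ [] := by
    simpa [PySem.List.sorted_eq_nil_iff]
  have hpw : (PySem.List.sorted F (fun y => y) false).Pairwise (· ≤ ·) :=
    PySem.List.sorted_pairwise F (fun y => y)
  obtain ⟨x, t, hxt⟩ := List.exists_cons_of_ne_nil hs
  rw [hxt] at hpw ⊢
  rw [List.foldl_cons]
  have hcond : ¬(((([], 0, none) : List Int × Int × Option String).2.1 ≠ 0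
      ∧ some x ≠ (([], 0, none) : List Int × Int × Option String).2.2)) := by simp
  rw [if_neg hcond]
  have hIH := pvScan t x 0 [] hpw.of_cons (fun y hy => List.rel_of_pairwise_cons hpw hy)
  simp only [Nat.cast_zero] at hIH
  rw [hIH]
  rw [List.nil_append]
  apply List.map_congr_left
  intro k hk
  by_cases hkx : k = x
  · simp [hkx]; omega
  · simp [hkx, List.count_cons]
    exact fun h => hkx (Eq.symm h)

lemma pvFlat_ne_nil (T : List String) (h : T ≠ []) : pvFlat T ≠ [] := by
  obtain ⟨c, rest, rfl⟩ := List.exists_cons_of_ne_nil h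
  have : c ∈ pvFlat (c :: rest) := by
    rw [pvFlat]
    exact List.mem_flatMap.mpr ⟨c, by simp, (PySem.Set.mem_ofList _ _).mpr (by simp)⟩
  exact List.ne_nil_of_mem this

lemma pvMain (T : List String) (h : T ≠ []) : solution T = solution_alt T := by
  have hF : pvFlat T ≠ [] := pvFlat_ne_nil T h
  have hBlist : T.foldl (fun acc c => acc ++ PySem.Set.ofList [c, pvVar1 c, pvVar2 c]) []
      = pvFlat T := by
    rw [PySem.List.foldl_append_eq_flatMap]; rfl
  have hitems : (PySem.Dict.counter (pvFlat T)).items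
      = (PySem.Set.ofList (pvFlat T)).map (fun k => (k, ((pvFlat T).count k : Int))) :=
    PySem.Dict.items_counter (pvFlat T)
  have hIV : (PySem.Dict.counter (pvFlat T)).items ≠ [] := by
    rw [hitems]
    have : (PySem.Set.ofList (pvFlat T)) ≠ [] := by
      obtain ⟨x, rest, hx⟩ := List.exists_cons_of_ne_nil hF
      have hx' : x ∈ pvFlat T := by rw [hx]; simp
      exact List.ne_nil_of_mem ((PySem.Set.mem_ofList (pvFlat T) x).mpr hx')
    simpa using this
  -- abbreviations for B's side
  set s := PySem.List.sorted (pvFlat T) (fun y => y) false with hsdef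
  have hsmem : ∀ k, k ∈ s ↔ k ∈ pvFlat T := fun k => PySem.List.mem_sorted _ _ _ k
  have hscount : ∀ k, s.count k = (pvFlat T).count k :=
    fun k => (PySem.List.sorted_perm (pvFlat T) (fun y => y) false).count_eq k
  have hruns : (PySem.List.dedup s).map (fun k => (s.count k : Int)) ≠ [] := by
    have hs : s ≠ [] := by rw [hsdef]; simpa [PySem.List.sorted_eq_nil_iff]
    obtain ⟨x, t, hxt⟩ := List.exists_cons_of_ne_nil hs
    have : x ∈ PySem.List.dedup s := by
      rw [PySem.List.mem_dedup, hxt]; simp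
    simpa using List.ne_nil_of_mem this
  obtain ⟨hsA, hmemA, hmaxA⟩ :=
    pvSorted_last_max (PySem.Dict.counter (pvFlat T)).items (fun kv => kv.2) hIV
  obtain ⟨hsB, hmemB, hmaxB⟩ :=
    pvSorted_last_max ((PySem.List.dedup s).map (fun k => (s.count k : Int))) (fun y => y) hruns
  -- reduce both programs to the two getLast values
  rw [solution, solution_alt]
  have hR := pvRuns (pvFlat T) hF
  simp only [← hsdef] at hR
  simp only [pvCounter_eq, hBlist, ← hsdef, hR]
  rw [pvPop_getLast _ hsA, pvPop_getLast _ hsB]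
  set mA := (PySem.List.sorted (PySem.Dict.counter (pvFlat T)).items (fun kv => kv.2) false).getLast hsA with hmA
  set mB := (PySem.List.sorted ((PySem.List.dedup s).map (fun k => (s.count k : Int))) (fun y => y) false).getLast hsB with hmB
  show mA.2 = mB
  rw [hitems] at hmemA
  obtain ⟨k, hkmem, hkeq⟩ := List.mem_map.mp hmemA
  have hkF : k ∈ pvFlat T := (PySem.Set.mem_ofList _ _).mp hkmem
  obtain ⟨x, hxdd, hxeq⟩ := List.mem_map.mp hmemB
  have hxF : x ∈ pvFlat T := (hsmem x).mp ((PySem.List.mem_dedup _ _).mp hxdd)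
  apply le_antisymm
  · -- mA.2 = count k ≤ mB since count k occurs among the run lengths
    have hkdd : k ∈ PySem.List.dedup s := (PySem.List.mem_dedup _ _).mpr ((hsmem k).mpr hkF)
    have : ((s.count k : Int)) ∈ (PySem.List.dedup s).map (fun y => (s.count y : Int)) :=
      List.mem_map.mpr ⟨k, hkdd, rfl⟩
    have hle := hmaxB _ this
    rw [← hkeq]
    simpa [hscount k] using hle
  · -- mB = count x ≤ mA.2 since (x, count x) is an item of the counter
    have hxIV : (x, ((pvFlat T).count x : Int)) ∈ (PySem.Dict.counter (pvFlat T)).items := by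
      rw [hitems]
      exact List.mem_map.mpr ⟨x, (PySem.Set.mem_ofList _ _).mpr hxF, rfl⟩
    have hle := hmaxA _ hxIV
    rw [← hxeq]
    simpa [hscount x] using hle

-- ===== VERDICT (by name: the statement is the Claim_ definition above) =====
theorem solution_spec : Claim_equal_solution := by
  intro T _ hpre
  unfold Spec_solution
  exact pvMain T hpre.1
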